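-- pv_equiv track=rewrite | github.com/deloaiprivatelimited/GPSTR-AMTSH-V4 | validate_chunk_schema.py | detect_field_variants
-- ===== SOURCE A (Python) =====
-- def detect_field_variants(data):
--     """Check for known field name variants and return issues."""
--     issues = []
--
--     # TTS field
--     if "tts" in data and "tts_config" not in data:
--         issues.append(("tts_field", "tts"))
--     elif "tts_config" in data and "tts" not in data:
--         issues.append(("tts_field", "tts_config"))
--     elif "tts" in data and "tts_config" in data:
--         issues.append(("tts_field", "BOTH tts & tts_config"))
--     else:
--         issues.append(("tts_field", "MISSING"))
--
--     # Visual field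
--     if "visual" in data and "visual_aid" not in data:
--         issues.append(("visual_field", "visual"))
--     elif "visual_aid" in data and "visual" not in data:
--         issues.append(("visual_field", "visual_aid"))
--     elif "visual" in data and "visual_aid" in data:
--         issues.append(("visual_field", "BOTH visual & visual_aid"))
--     else:
--         issues.append(("visual_field", "MISSING"))
--
--     # Title field
--     if "slide_title" in data:
--         issues.append(("title_field", "slide_title"))
--     elif "title" in data:
--         issues.append(("title_field", "title"))
--     else:
--         issues.append(("title_field", "MISSING"))
--
--     # Type field
--     if "type" in data and "slide_type" not in data:
--         issues.append(("type_field", "type"))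
--     elif "slide_type" in data and "type" not in data:
--         issues.append(("type_field", "slide_type"))
--     elif "type" in data and "slide_type" in data:
--         issues.append(("type_field", "BOTH type & slide_type"))
--     else:
--         issues.append(("type_field", "MISSING"))
--
--     # Script location
--     if "script" in data:
--         issues.append(("script_location", "top_level"))
--     elif "content" in data and isinstance(data["content"], dict) and "script" in data["content"]:
--         issues.append(("script_location", "inside_content"))
--     else:
--         issues.append(("script_location", "MISSING"))
--
--     # script_display
--     if "script_display" in data:
--         issues.append(("has_script_display", "yes"))
--     elif "content" in data and isinstance(data["content"], dict) and "script_display" in data.get("content", {}):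
--         issues.append(("has_script_display", "yes (in content)"))
--     else:
--         issues.append(("has_script_display", "no"))
--
--     # display_bullets location
--     if "display_bullets" in data:
--         issues.append(("bullets_location", "top_level"))
--     elif "content" in data and isinstance(data["content"], dict) and "steps" in data["content"]:
--         issues.append(("bullets_location", "content.steps"))
--     else:
--         issues.append(("bullets_location", "MISSING"))
--
--     # chunk_id
--     if "chunk_id" in data:
--         issues.append(("has_chunk_id", "yes"))
--     else:
--         issues.append(("has_chunk_id", "MISSING"))
--
--     # Extra fields that only some schemas have
--     for extra in ["slug", "module_id", "slide_id", "slide_number", "source_example_id", "notes"]: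
--         if extra in data:
--             issues.append((f"extra_{extra}", "present"))
--
--     return issues
-- ===== SOURCE B (Python) =====
-- # Data-driven rewrite: one pass over the dict builds a presence set of scoped keys
-- # (("top", k) and ("content", k)); a declarative rule table is then interpreted by a
-- # generic first-match-whose-requirements-are-all-present loop.
--
-- RULES = [
--     ("tts_field", [((("top", "tts"), ("top", "tts_config")), "BOTH tts & tts_config"),
--                    ((("top", "tts"),), "tts"),
--                    ((("top", "tts_config"),), "tts_config"),
--                    ((), "MISSING")]),
--     ("visual_field", [((("top", "visual"), ("top", "visual_aid")), "BOTH visual & visual_aid"),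
--                       ((("top", "visual"),), "visual"),
--                       ((("top", "visual_aid"),), "visual_aid"),
--                       ((), "MISSING")]),
--     ("title_field", [((("top", "slide_title"),), "slide_title"),
--                      ((("top", "title"),), "title"),
--                      ((), "MISSING")]),
--     ("type_field", [((("top", "type"), ("top", "slide_type")), "BOTH type & slide_type"),
--                     ((("top", "type"),), "type"),
--                     ((("top", "slide_type"),), "slide_type"),
--                     ((), "MISSING")]),
--     ("script_location", [((("top", "script"),), "top_level"),
--                          ((("content", "script"),), "inside_content"),
--                          ((), "MISSING")]),
--     ("has_script_display", [((("top", "script_display"),), "yes"),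
--                             ((("content", "script_display"),), "yes (in content)"),
--                             ((), "no")]),
--     ("bullets_location", [((("top", "display_bullets"),), "top_level"),
--                           ((("content", "steps"),), "content.steps"),
--                           ((), "MISSING")]),
--     ("has_chunk_id", [((("top", "chunk_id"),), "yes"),
--                       ((), "MISSING")]),
-- ]
--
-- EXTRAS = ["slug", "module_id", "slide_id", "slide_number", "source_example_id", "notes"]
--
--
-- def detect_field_variants(data):
--     """Check for known field name variants and return issues (presence-set + rule table)."""
--     present = {("top", k) for k in data}
--     if "content" in data and isinstance(data["content"], dict):
--         present |= {("content", k) for k in data["content"]}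
--     issues = []
--     for key, alts in RULES:
--         for req, label in alts:
--             if all(r in present for r in req):
--                 issues.append((key, label))
--                 break
--     issues += [("extra_" + e, "present") for e in EXTRAS if ("top", e) in present]
--     return issues
-- ===== Notes on version B (the rewrite author's own statement) =====
-- stated objective: alternative
-- what changed: Replaces A's nine hard-coded if/elif/append blocks with a one-pass construction of a presence set of scoped keys (('top',k)/('content',k)) plus a declarative rule table interpreted by a single generic first-match loop (pick the first alternative whose required scoped keys are all present).
import Mathlib
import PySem

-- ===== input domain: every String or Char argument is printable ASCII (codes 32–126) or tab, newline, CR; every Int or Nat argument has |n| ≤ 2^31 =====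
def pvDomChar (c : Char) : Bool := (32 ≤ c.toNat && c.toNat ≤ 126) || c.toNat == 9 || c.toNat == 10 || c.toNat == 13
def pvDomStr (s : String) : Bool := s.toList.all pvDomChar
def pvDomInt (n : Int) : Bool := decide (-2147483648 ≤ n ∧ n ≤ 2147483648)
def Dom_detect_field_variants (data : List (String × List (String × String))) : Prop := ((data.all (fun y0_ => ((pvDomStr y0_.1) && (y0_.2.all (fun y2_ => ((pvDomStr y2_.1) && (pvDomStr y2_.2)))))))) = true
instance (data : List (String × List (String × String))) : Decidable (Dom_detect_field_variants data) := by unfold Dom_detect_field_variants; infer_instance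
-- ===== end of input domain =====

-- B replaces A's nine hard-coded if/elif/append blocks by a one-pass presence set of
-- scoped keys plus a declarative rule table interpreted by one generic first-match loop
-- (objective: alternative). Same values everywhere.
-- Under the type convention every value of `data` is a dict, so Python's
-- `isinstance(data["content"], dict)` guard is identically true and is ported as such.

-- ===== PORT A =====
-- '"k" in d' for a Python dict ported as an association list: first-match key membership
def pyKeyMem {α : Type} (d : List (String × α)) (k : String) : Bool :=
  (List.lookup k d).isSome

-- 'data["content"]' is only evaluated under the guard '"content" in data'; getD [] is the
-- (unreachable-default) first-match lookup.
def pyContent (data : List (String × List (String × String))) : List (String × String) :=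
  (List.lookup "content" data).getD []

def detect_field_variants (data : List (String × List (String × String))) : List (String × String) :=
  let issues : List (String × String) := []
  -- TTS field
  let issues := issues ++
    [if pyKeyMem data "tts" && !pyKeyMem data "tts_config" then ("tts_field", "tts")
     else if pyKeyMem data "tts_config" && !pyKeyMem data "tts" then ("tts_field", "tts_config")
     else if pyKeyMem data "tts" && pyKeyMem data "tts_config" then ("tts_field", "BOTH tts & tts_config")
     else ("tts_field", "MISSING")]
  -- Visual field
  let issues := issues ++
    [if pyKeyMem data "visual" && !pyKeyMem data "visual_aid" then ("visual_field", "visual")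
     else if pyKeyMem data "visual_aid" && !pyKeyMem data "visual" then ("visual_field", "visual_aid")
     else if pyKeyMem data "visual" && pyKeyMem data "visual_aid" then ("visual_field", "BOTH visual & visual_aid")
     else ("visual_field", "MISSING")]
  -- Title field
  let issues := issues ++
    [if pyKeyMem data "slide_title" then ("title_field", "slide_title")
     else if pyKeyMem data "title" then ("title_field", "title")
     else ("title_field", "MISSING")]
  -- Type field
  let issues := issues ++
    [if pyKeyMem data "type" && !pyKeyMem data "slide_type" then ("type_field", "type")
     else if pyKeyMem data "slide_type" && !pyKeyMem data "type" then ("type_field", "slide_type")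
     else if pyKeyMem data "type" && pyKeyMem data "slide_type" then ("type_field", "BOTH type & slide_type")
     else ("type_field", "MISSING")]
  -- Script location
  let issues := issues ++
    [if pyKeyMem data "script" then ("script_location", "top_level")
     else if pyKeyMem data "content" && pyKeyMem (pyContent data) "script" then ("script_location", "inside_content")
     else ("script_location", "MISSING")]
  -- script_display
  let issues := issues ++
    [if pyKeyMem data "script_display" then ("has_script_display", "yes")
     else if pyKeyMem data "content" && pyKeyMem (pyContent data) "script_display" then ("has_script_display", "yes (in content)")
     else ("has_script_display", "no")]
  -- display_bullets location
  let issues := issues ++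
    [if pyKeyMem data "display_bullets" then ("bullets_location", "top_level")
     else if pyKeyMem data "content" && pyKeyMem (pyContent data) "steps" then ("bullets_location", "content.steps")
     else ("bullets_location", "MISSING")]
  -- chunk_id
  let issues := issues ++
    [if pyKeyMem data "chunk_id" then ("has_chunk_id", "yes")
     else ("has_chunk_id", "MISSING")]
  -- Extra fields loop
  List.foldl
    (fun acc extra => if pyKeyMem data extra then acc ++ [("extra_" ++ extra, "present")] else acc)
    issues
    ["slug", "module_id", "slide_id", "slide_number", "source_example_id", "notes"]

-- ===== PORT B =====
-- the declarative rule table: for each output key, alternatives tried in order; the first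
-- alternative whose required scoped keys are all present supplies the label
def dfvRules : List (String × List (List (String × String) × String)) :=
  [("tts_field", [([("top", "tts"), ("top", "tts_config")], "BOTH tts & tts_config"),
                  ([("top", "tts")], "tts"),
                  ([("top", "tts_config")], "tts_config"),
                  ([], "MISSING")]),
   ("visual_field", [([("top", "visual"), ("top", "visual_aid")], "BOTH visual & visual_aid"),
                     ([("top", "visual")], "visual"),
                     ([("top", "visual_aid")], "visual_aid"),
                     ([], "MISSING")]),
   ("title_field", [([("top", "slide_title")], "slide_title"),
                    ([("top", "title")], "title"),
                    ([], "MISSING")]),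
   ("type_field", [([("top", "type"), ("top", "slide_type")], "BOTH type & slide_type"),
                   ([("top", "type")], "type"),
                   ([("top", "slide_type")], "slide_type"),
                   ([], "MISSING")]),
   ("script_location", [([("top", "script")], "top_level"),
                        ([("content", "script")], "inside_content"),
                        ([], "MISSING")]),
   ("has_script_display", [([("top", "script_display")], "yes"),
                           ([("content", "script_display")], "yes (in content)"),
                           ([], "no")]),
   ("bullets_location", [([("top", "display_bullets")], "top_level"),
                         ([("content", "steps")], "content.steps"),
                         ([], "MISSING")]),
   ("has_chunk_id", [([("top", "chunk_id")], "yes"),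
                     ([], "MISSING")])]

def dfvExtras : List String :=
  ["slug", "module_id", "slide_id", "slide_number", "source_example_id", "notes"]

-- one pass: the presence set of scoped keys (('top', k) for top-level, ('content', k) nested)
def dfvPresent (data : List (String × List (String × String))) : PySem.Set (String × String) :=
  let present := PySem.Set.ofList (data.map (fun p => (("top" : String), p.1)))
  if (List.lookup "content" data).isSome then
    PySem.Set.union present (((List.lookup "content" data).getD []).map (fun p => (("content" : String), p.1)))
  else present

def detect_field_variants_alt (data : List (String × List (String × String))) : List (String × String) :=
  let present := dfvPresent data
  let issues := dfvRules.foldl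
    (fun acc ka =>
      acc ++ (match ka.2.find? (fun ra => ra.1.all (fun r => PySem.Set.contains present r)) with
              | some ra => [(ka.1, ra.2)]
              | none => [])) []
  issues ++ (dfvExtras.filter (fun e => PySem.Set.contains present (("top" : String), e))).map
    (fun e => (("extra_" ++ e : String), ("present" : String)))

-- ===== PRECONDITION & SPEC =====
def Spec_detect_field_variants (data : List (String × List (String × String))) (out : List (String × String)) : Prop := out = detect_field_variants_alt data
instance (data : List (String × List (String × String))) (out : List (String × String)) : Decidable (Spec_detect_field_variants data out) := by unfold Spec_detect_field_variants; infer_instance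

-- ===== CLAIM (what is proved, stated in full; the proofs are below) =====
def Claim_equal_detect_field_variants : Prop := ∀ (data : List (String × List (String × String))), Dom_detect_field_variants data → Spec_detect_field_variants data (detect_field_variants data)

-- ===== LEMMAS AND PROOFS =====

theorem contains_present_top (data : List (String × List (String × String))) (k : String) :
    PySem.Set.contains (dfvPresent data) (("top" : String), k) = pyKeyMem data k := by
  unfold dfvPresent pyKeyMem
  by_cases hc : (List.lookup "content" data).isSome = true <;>
    [rw [if_pos hc]; rw [if_neg hc]] <;>
    rw [Bool.eq_iff_iff, PySem.Set.contains_iff] <;>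
    simp [PySem.Set.mem_union, PySem.Set.mem_ofList, List.mem_map, Prod.ext_iff]

theorem contains_present_content (data : List (String × List (String × String))) (k : String) :
    PySem.Set.contains (dfvPresent data) (("content" : String), k)
      = (pyKeyMem data "content" && pyKeyMem (pyContent data) k) := by
  unfold dfvPresent pyKeyMem pyContent
  by_cases hc : (List.lookup "content" data).isSome = true <;>
    [rw [if_pos hc]; rw [if_neg hc]] <;>
    rw [Bool.eq_iff_iff, PySem.Set.contains_iff] <;>
    simp [hc, PySem.Set.mem_union, PySem.Set.mem_ofList, List.mem_map, Prod.ext_iff]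

-- evaluating the first-match interpreter on a 3-alternative (BOTH/a/b/default) rule
theorem find3_eq (P : String × String → Bool) (r1 r2 : String × String) (k l12 l1 l2 l0 : String) :
    (match List.find? (fun ra => ra.1.all P)
        ([([r1, r2], l12), ([r1], l1), ([r2], l2), ([], l0)] :
          List (List (String × String) × String)) with
     | some ra => [(k, ra.2)]
     | none => ([] : List (String × String))) =
    [if P r1 && P r2 then (k, l12) else if P r1 then (k, l1)
     else if P r2 then (k, l2) else (k, l0)] := by
  cases h1 : P r1 <;> cases h2 : P r2 <;> simp [List.find?, h1, h2]

-- the same on a 2-alternative-plus-default rule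
theorem find2_eq (P : String × String → Bool) (r1 r2 : String × String) (k l1 l2 l0 : String) :
    (match List.find? (fun ra => ra.1.all P)
        ([([r1], l1), ([r2], l2), ([], l0)] : List (List (String × String) × String)) with
     | some ra => [(k, ra.2)]
     | none => ([] : List (String × String))) =
    [if P r1 then (k, l1) else if P r2 then (k, l2) else (k, l0)] := by
  cases h1 : P r1 <;> cases h2 : P r2 <;> simp [List.find?, h1, h2]

-- and on a single-alternative-plus-default rule
theorem find1_eq (P : String × String → Bool) (r1 : String × String) (k l1 l0 : String) :
    (match List.find? (fun ra => ra.1.all P)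
        ([([r1], l1), ([], l0)] : List (List (String × String) × String)) with
     | some ra => [(k, ra.2)]
     | none => ([] : List (String × String))) =
    [if P r1 then (k, l1) else (k, l0)] := by
  cases h1 : P r1 <;> simp [List.find?, h1]

theorem detect_field_variants_main_eq :
    ∀ data, detect_field_variants data = detect_field_variants_alt data := by
  intro data
  unfold detect_field_variants detect_field_variants_alt dfvRules dfvExtras
  rw [PySem.List.foldl_append_if (fun e => pyKeyMem data e)
        (fun e => (("extra_" ++ e : String), ("present" : String)))]
  simp only [PySem.List.foldl_append_eq_flatMap]
  simp only [List.flatMap_cons, List.flatMap_nil, find3_eq, find2_eq, find1_eq,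
    contains_present_top, contains_present_content, List.append_nil,
    List.nil_append, List.cons_append, List.cons.injEq]
  refine ⟨?_, ?_, ?_, ?_, ?_⟩ <;> (try trivial) <;> (split_ifs <;> simp_all)

-- ===== VERDICT (by name: the statement is the Claim_ definition above) =====
theorem detect_field_variants_spec : Claim_equal_detect_field_variants := by
  intro data _
  exact detect_field_variants_main_eq data
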